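-- pv_equiv track=rewrite | github.com/arthurdysart/LeetCode | 0657_robot_return_to_origin/python_source.py | is_cyclic_path
-- ===== SOURCE A (Python) =====
-- def is_cyclic_path(s):
--     """
--     Determines whether movement pattern returns to original position.
--
--     :param str s: input string as movement pattern
--     :return: True if movement pattern returns to original position
--     :rtype: bool
--     """
--     if not s:
--         return True
--
--     x = 0
--     y = 0
--
--     for c in s:
--
--         if c == "U":
--             x += 1
--         elif c == "D":
--             x -= 1
--         elif c == "L":
--             y -= 1
--         elif c == "R":
--             y += 1
--         else:
--             # Found invalid movement character
--             return False
--
--     return (x == 0 and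
--             y == 0)
-- ===== SOURCE B (Python) =====
-- def is_cyclic_path(s):
--     return (set(s) <= {"U", "D", "L", "R"}
--             and s.count("U") == s.count("D")
--             and s.count("L") == s.count("R"))
-- ===== Notes on version B (the rewrite author's own statement) =====
-- stated objective: simpler
-- what changed: Replaces the per-character branching loop with running coordinate accumulators and early return by a tally: validity is a set-inclusion check and the origin test becomes equality of the up/down and left/right character counts.
import Mathlib
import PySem

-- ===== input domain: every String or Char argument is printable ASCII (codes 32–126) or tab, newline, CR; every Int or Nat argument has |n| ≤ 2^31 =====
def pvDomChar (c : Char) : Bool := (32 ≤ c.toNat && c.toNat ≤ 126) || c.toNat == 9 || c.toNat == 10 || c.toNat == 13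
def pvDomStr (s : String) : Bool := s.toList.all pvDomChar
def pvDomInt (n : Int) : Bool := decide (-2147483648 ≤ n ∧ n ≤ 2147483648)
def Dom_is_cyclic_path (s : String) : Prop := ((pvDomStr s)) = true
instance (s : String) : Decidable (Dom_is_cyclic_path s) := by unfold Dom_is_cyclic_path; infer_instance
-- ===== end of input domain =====

-- B replaces the coordinate-walking loop with early return by a tally: set-inclusion validity plus count equality (simpler decomposition).


-- ===== PORT A =====
-- the for-loop with its early 'return False': structural recursion over the characters carrying x, y
def isCyclicGoA : List Char → Int → Int → Bool
  | [], x, y => x == 0 && y == 0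
  | c :: cs, x, y =>
      if c = 'U' then isCyclicGoA cs (x + 1) y
      else if c = 'D' then isCyclicGoA cs (x - 1) y
      else if c = 'L' then isCyclicGoA cs x (y - 1)
      else if c = 'R' then isCyclicGoA cs x (y + 1)
      else false

def is_cyclic_path (s : String) : Bool :=
  if s.toList = [] then true
  else isCyclicGoA s.toList 0 0

-- ===== PORT B =====
def is_cyclic_path_alt (s : String) : Bool :=
  s.toList.all (fun c => c ∈ ['U', 'D', 'L', 'R']) &&
  s.toList.count 'U' == s.toList.count 'D' &&
  s.toList.count 'L' == s.toList.count 'R'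

-- ===== PRECONDITION & SPEC =====
def Spec_is_cyclic_path (s : String) (out : Bool) : Prop := out = is_cyclic_path_alt s
instance (s : String) (out : Bool) : Decidable (Spec_is_cyclic_path s out) := by unfold Spec_is_cyclic_path; infer_instance

-- ===== CLAIM (what is proved, stated in full; the proofs are below) =====
def Claim_equal_is_cyclic_path : Prop := ∀ (s : String), Dom_is_cyclic_path s → Spec_is_cyclic_path s (is_cyclic_path s)

-- ===== LEMMAS AND PROOFS =====

theorem and_congr_mid (A C : Bool) {a b : Int} (h : a = b) :
    (A && (a == 0) && C) = (A && (b == 0) && C) := by rw [h]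

theorem and_congr_last (A B : Bool) {a b : Int} (h : a = b) :
    (A && B && (a == 0)) = (A && B && (b == 0)) := by rw [h]

theorem int_cnt_eq (u d : Nat) : ((0 + (u : Int) - (d : Int) == 0)) = (u == d) := by
  rw [Bool.eq_iff_iff]
  simp only [beq_iff_eq]
  omega

theorem int_cnt_eq' (r l : Nat) : ((0 + (r : Int) - (l : Int) == 0)) = (l == r) := by
  rw [Bool.eq_iff_iff]
  simp only [beq_iff_eq]
  omega

theorem isCyclicGoA_eq (cs : List Char) (x y : Int) :
    isCyclicGoA cs x y =
      (cs.all (fun c => c ∈ ['U', 'D', 'L', 'R']) &&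
       (x + cs.count 'U' - cs.count 'D' == 0) &&
       (y + cs.count 'R' - cs.count 'L' == 0)) := by
  induction cs generalizing x y with
  | nil => simp [isCyclicGoA]
  | cons c cs ih =>
      by_cases hU : c = 'U'
      · subst hU
        simp only [isCyclicGoA, ih, List.all_cons, List.count_cons, reduceIte]
        exact and_congr_mid _ _ (by push_cast; simp only [reduceIte]; omega)
      · by_cases hD : c = 'D'
        · subst hD
          simp only [isCyclicGoA, ih, List.all_cons, List.count_cons, reduceIte]
          exact and_congr_mid _ _ (by push_cast; simp only [reduceIte]; omega)
        · by_cases hL : c = 'L'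
          · subst hL
            simp only [isCyclicGoA, ih, List.all_cons, List.count_cons, reduceIte]
            exact and_congr_last _ _ (by push_cast; simp only [reduceIte]; omega)
          · by_cases hR : c = 'R'
            · subst hR
              simp only [isCyclicGoA, ih, List.all_cons, List.count_cons, reduceIte]
              exact and_congr_last _ _ (by push_cast; simp only [reduceIte]; omega)
            · simp [isCyclicGoA, List.all_cons, hU, hD, hL, hR]

-- ===== VERDICT (by name: the statement is the Claim_ definition above) =====
theorem is_cyclic_path_spec : Claim_equal_is_cyclic_path := by
  intro s _
  unfold Spec_is_cyclic_path is_cyclic_path is_cyclic_path_alt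
  by_cases h : s.toList = []
  · simp [h]
  · rw [if_neg h, isCyclicGoA_eq, int_cnt_eq, int_cnt_eq']
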